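-- pv_equiv track=rewrite | github.com/tsuru7/algorithm-study | AtCoder/ABC257/C.py | solve
-- ===== SOURCE A (Python) =====
-- from collections import deque
--
-- def solve(n,s,w):
--     adult = []
--     child = []
--     for c, wi in zip(s, w):
--         if c == '0':
--             child.append(wi)
--         else:
--             adult.append(wi)
--     adult.sort()
--     child.sort()
--     n_adult = len(adult)
--     n_child = len(child)
--
--     adult = deque(adult)
--     child = deque(child)
--
--     w.sort()
--     w.insert(0, 0)
--     w.append(10**9+1)
--     point = 0
--     for wi in w:
--         while len(adult) > 0 and adult[0] < wi:
--             adult.popleft()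
--         while len(child) > 0 and child[0] < wi:
--             child.popleft()
--         point = max(point, len(adult) + n_child - len(child))
--
--
--     return point
-- ===== SOURCE B (Python) =====
-- def lower_bound(xs, x):
--     # first index whose element is >= x, in the sorted list xs (hand-written bisect_left)
--     lo, hi = 0, len(xs)
--     while lo < hi:
--         mid = (lo + hi) // 2
--         if xs[mid] < x:
--             lo = mid + 1
--         else:
--             hi = mid
--     return lo
--
-- def solve(n, s, w):
--     # Partition and sort the two groups, then for each cutoff (running max of the
--     # sorted-with-sentinels threshold list; A mutates w the same way in place)
--     # count adults >= cutoff and children < cutoff by binary search instead of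
--     # destructively popping deques.
--     adult = sorted(wi for c, wi in zip(s, w) if c != '0')
--     child = sorted(wi for c, wi in zip(s, w) if c == '0')
--     w.sort()
--     w.insert(0, 0)
--     w.append(10**9 + 1)
--     best = 0
--     m = 0
--     for x in w:
--         m = max(m, x)
--         best = max(best, (len(adult) - lower_bound(adult, m)) + lower_bound(child, m))
--     return best
-- ===== Notes on version B (the rewrite author's own statement) =====
-- stated objective: alternative
-- what changed: Replaces A's amortized two-pointer sweep (two sorted deques destructively popped as the thresholds rise, with a running best) by stateless per-cutoff counting: for each cutoff (running max of the threshold list) a hand-written bisect_left binary search on the sorted partitions yields adults >= cutoff and children < cutoff.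
import Mathlib
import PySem

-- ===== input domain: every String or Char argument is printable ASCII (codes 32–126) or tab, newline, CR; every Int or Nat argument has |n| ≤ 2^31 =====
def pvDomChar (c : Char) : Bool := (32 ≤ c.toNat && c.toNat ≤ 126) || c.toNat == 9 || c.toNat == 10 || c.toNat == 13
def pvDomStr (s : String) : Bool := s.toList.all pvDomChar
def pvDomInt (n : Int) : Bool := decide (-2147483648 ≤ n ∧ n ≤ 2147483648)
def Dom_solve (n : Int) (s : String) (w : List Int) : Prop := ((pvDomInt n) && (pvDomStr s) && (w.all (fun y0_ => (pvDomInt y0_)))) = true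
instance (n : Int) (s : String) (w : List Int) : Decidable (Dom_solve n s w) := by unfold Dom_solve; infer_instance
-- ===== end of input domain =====

-- B replaces A's deque-popping two-pointer sweep by per-cutoff binary-search
-- counts over the sorted partitions (alternative algorithm, same threshold list);
-- both mutate the Python list argument w identically (sorted, 0 prepended,
-- 10**9+1 appended) — the theorems here are about the return value.

-- ===== PORT A =====
def solve (n : Int) (s : String) (w : List Int) : Int :=
  let ac := (s.toList.zip w).foldl
      (fun (st : List Int × List Int) cw =>
        if cw.1 = '0' then (st.1, st.2 ++ [cw.2]) else (st.1 ++ [cw.2], st.2))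
      ([], [])
  let adult := PySem.List.sorted ac.1 (fun x => x) false
  let child := PySem.List.sorted ac.2 (fun x => x) false
  let nChild : Int := child.length
  let ws := 0 :: (PySem.List.sorted w (fun x => x) false ++ [10 ^ 9 + 1])
  let r := ws.foldl
      (fun (st : List Int × List Int × Int) wi =>
        let a := st.1.dropWhile (fun v => decide (v < wi))
        let c := st.2.1.dropWhile (fun v => decide (v < wi))
        (a, c, max st.2.2 ((a.length : Int) + nChild - (c.length : Int))))
      (adult, child, 0)
  r.2.2

-- ===== PORT B =====
-- hand-written binary search from Source B (bisect_left); xs[mid] is always in range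
-- when taken (0 ≤ lo ≤ mid < hi ≤ xs.length), so getD is exact there
def lbAux (xs : List Int) (x lo hi : Int) : Int :=
  if h : lo < hi then
    let mid := PySem.Int.floordiv (lo + hi) 2
    if xs.getD mid.toNat 0 < x then lbAux xs x (mid + 1) hi else lbAux xs x lo mid
  else lo
termination_by (hi - lo).toNat
decreasing_by
  · have hb := PySem.Int.floordiv_two_mid_bounds (le_of_lt h)
    omega
  · have hlt : PySem.Int.floordiv (lo + hi) 2 < hi := by
      rw [PySem.Int.floordiv_lt_iff_lt_mul (by omega)]
      omega
    omega

def lowerBound (xs : List Int) (x : Int) : Int :=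
  lbAux xs x 0 xs.length

def solve_alt (n : Int) (s : String) (w : List Int) : Int :=
  let adult := PySem.List.sorted
      ((s.toList.zip w).filterMap (fun cw => if cw.1 ≠ '0' then some cw.2 else none)) (fun x => x) false
  let child := PySem.List.sorted
      ((s.toList.zip w).filterMap (fun cw => if cw.1 = '0' then some cw.2 else none)) (fun x => x) false
  let ws := 0 :: (PySem.List.sorted w (fun x => x) false ++ [10 ^ 9 + 1])
  let r := ws.foldl
      (fun (st : Int × Int) x =>
        let m := max st.1 x
        (m, max st.2 (((adult.length : Int) - lowerBound adult m) + lowerBound child m)))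
      (0, 0)
  r.2

-- ===== PRECONDITION & SPEC =====
def Spec_solve (n : Int) (s : String) (w : List Int) (out : Int) : Prop := out = solve_alt n s w
instance (n : Int) (s : String) (w : List Int) (out : Int) : Decidable (Spec_solve n s w out) := by unfold Spec_solve; infer_instance

-- ===== CLAIM (what is proved, stated in full; the proofs are below) =====
def Claim_equal_solve : Prop := ∀ (n : Int) (s : String) (w : List Int), Dom_solve n s w → Spec_solve n s w (solve n s w)

-- ===== LEMMAS AND PROOFS =====

-- A's partition loop (two accumulating lists) equals B's two comprehensions.
theorem partition_fold (l : List (Char × Int)) (a c : List Int) :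
    l.foldl (fun (st : List Int × List Int) cw =>
        if cw.1 = '0' then (st.1, st.2 ++ [cw.2]) else (st.1 ++ [cw.2], st.2)) (a, c)
      = (a ++ l.filterMap (fun cw => if cw.1 ≠ '0' then some cw.2 else none),
         c ++ l.filterMap (fun cw => if cw.1 = '0' then some cw.2 else none)) := by
  induction l generalizing a c with
  | nil => simp
  | cons hd tl ih =>
      by_cases h : hd.1 = '0' <;> simp [h, ih]

-- Two successive "pop while head < cutoff" passes collapse to one at the max cutoff.
theorem dropWhile_lt_dropWhile_lt (l : List Int) (m x : Int) :
    (l.dropWhile (fun v => decide (v < m))).dropWhile (fun v => decide (v < x))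
      = l.dropWhile (fun v => decide (v < max m x)) := by
  induction l with
  | nil => rfl
  | cons hd tl ih =>
      by_cases h1 : hd < m
      · have h2 : hd < max m x := lt_max_of_lt_left h1
        simp [List.dropWhile, h1, h2, ih]
      · by_cases h3 : hd < x
        · have hmx : max m x = x := max_eq_right (by omega)
          simp [List.dropWhile, h1, h3, hmx]
        · have h4 : ¬ hd < max m x := by omega
          simp [List.dropWhile, h1, h3, h4]

-- On a sorted list, popping the leading elements below m keeps exactly those ≥ m.
theorem dropWhile_lt_of_sorted (l : List Int) (h : l.Pairwise (· ≤ ·)) (m : Int) :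
    l.dropWhile (fun v => decide (v < m)) = l.filter (fun v => decide (m ≤ v)) := by
  induction l with
  | nil => rfl
  | cons hd tl ih =>
      rcases List.pairwise_cons.mp h with ⟨hhd, htl⟩
      by_cases h1 : hd < m
      · have : ¬ m ≤ hd := by omega
        simp [List.dropWhile, h1, this, ih htl]
      · have h2 : m ≤ hd := by omega
        have : tl.filter (fun v => decide (m ≤ v)) = tl := by
          apply List.filter_eq_self.mpr
          intro b hb
          exact decide_eq_true (le_trans h2 (hhd b hb))
        simp [List.dropWhile, h1, h2, this]

theorem countP_split (l : List Int) (m : Int) :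
    l.countP (fun v => decide (m ≤ v)) + l.countP (fun v => decide (v < m)) = l.length := by
  induction l with
  | nil => simp
  | cons hd tl ih =>
      by_cases h : m ≤ hd
      · have h2 : ¬ hd < m := by omega
        simp [h, h2]
        omega
      · have h2 : hd < m := by omega
        simp [h, h2]
        omega

theorem countP_compl (l : List Int) (m : Int) :
    (l.length : Int) - (l.countP (fun v => decide (m ≤ v)) : Int)
      = (l.countP (fun v => decide (v < m)) : Int) := by
  have := countP_split l m
  omega

-- The main loop invariant: A's fold from popped-at-m lists equals B's fold from (m, point).
theorem loop_inv (ws : List Int) (A0 C0 : List Int)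
    (hA : A0.Pairwise (· ≤ ·)) (hC : C0.Pairwise (· ≤ ·)) (m point : Int) :
    (ws.foldl
      (fun (st : List Int × List Int × Int) wi =>
        let a := st.1.dropWhile (fun v => decide (v < wi))
        let c := st.2.1.dropWhile (fun v => decide (v < wi))
        (a, c, max st.2.2 ((a.length : Int) + (C0.length : Int) - (c.length : Int))))
      (A0.dropWhile (fun v => decide (v < m)), C0.dropWhile (fun v => decide (v < m)), point)).2.2
    = (ws.foldl
      (fun (st : Int × Int) x =>
        let m' := max st.1 x
        (m', max st.2 ((A0.countP (fun a => decide (m' ≤ a)) : Int)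
                        + (C0.countP (fun c => decide (c < m')) : Int))))
      (m, point)).2 := by
  induction ws generalizing m point with
  | nil => rfl
  | cons x rest ih =>
      have hlenA : ((A0.dropWhile (fun v => decide (v < max m x))).length : Int)
          = (A0.countP (fun a => decide (max m x ≤ a)) : Int) := by
        rw [dropWhile_lt_of_sorted A0 hA, ← List.countP_eq_length_filter]
      have hlenC : (C0.length : Int) - ((C0.dropWhile (fun v => decide (v < max m x))).length : Int)
          = (C0.countP (fun c => decide (c < max m x)) : Int) := by
        rw [dropWhile_lt_of_sorted C0 hC, ← List.countP_eq_length_filter]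
        exact countP_compl C0 (max m x)
      simp only [List.foldl_cons, dropWhile_lt_dropWhile_lt]
      rw [show ((A0.dropWhile (fun v => decide (v < max m x))).length : Int)
            + (C0.length : Int) - ((C0.dropWhile (fun v => decide (v < max m x))).length : Int)
          = (A0.countP (fun a => decide (max m x ≤ a)) : Int)
            + (C0.countP (fun c => decide (c < max m x)) : Int) by omega]
      exact ih (max m x) _

-- a countP over a list that is < x exactly on its first k positions equals k
theorem countP_of_split (xs : List Int) (x : Int) (k : Nat) (hk : k ≤ xs.length)
    (hlo : ∀ (i : Nat) (h : i < xs.length), i < k → xs[i] < x)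
    (hhi : ∀ (i : Nat) (h : i < xs.length), k ≤ i → ¬ xs[i] < x) :
    xs.countP (fun v => decide (v < x)) = k := by
  have hsplit := List.take_append_drop k xs
  have h1 : (xs.take k).countP (fun v => decide (v < x)) = k := by
    have hall : ∀ a ∈ xs.take k, (fun v => decide (v < x)) a = true := by
      intro a ha
      rcases List.mem_iff_getElem.mp ha with ⟨i, hi, rfl⟩
      have hi' : i < xs.length := lt_of_lt_of_le (lt_of_lt_of_le hi (by simp)) (le_refl _)
      rw [List.getElem_take]
      exact decide_eq_true (hlo i (by omega) (by simp at hi; omega))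
    rw [List.countP_eq_length.mpr hall, List.length_take]
    omega
  have h2 : (xs.drop k).countP (fun v => decide (v < x)) = 0 := by
    apply List.countP_eq_zero.mpr
    intro a ha
    rcases List.mem_iff_getElem.mp ha with ⟨i, hi, rfl⟩
    rw [List.getElem_drop]
    simp only [decide_eq_true_eq]
    exact hhi (k + i) (by simp at hi; omega) (by omega)
  calc xs.countP (fun v => decide (v < x))
      = ((xs.take k) ++ (xs.drop k)).countP (fun v => decide (v < x)) := by rw [hsplit]
    _ = k := by rw [List.countP_append, h1, h2]; omega


-- the hand-written binary search counts the elements below x in a sorted list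
theorem lbAux_spec (xs : List Int) (x : Int) (hs : xs.Pairwise (· ≤ ·)) :
    ∀ (fuel : Nat) (lo hi : Int), (hi - lo).toNat ≤ fuel → 0 ≤ lo → lo ≤ hi → hi ≤ xs.length →
    (∀ (i : Nat) (h : i < xs.length), (i : Int) < lo → xs[i] < x) →
    (∀ (i : Nat) (h : i < xs.length), hi ≤ (i : Int) → ¬ xs[i] < x) →
    lbAux xs x lo hi = (xs.countP (fun v => decide (v < x)) : Int) := by
  have hmono : ∀ (i j : Nat) (hj : j < xs.length) (hij : i ≤ j), xs[i]'(by omega) ≤ xs[j] := by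
    intro i j hj hij
    rcases Nat.eq_or_lt_of_le hij with rfl | hlt
    · exact le_refl _
    · exact List.pairwise_iff_getElem.mp hs i j (by omega) hj hlt
  intro fuel
  induction fuel with
  | zero =>
      intro lo hi hf h0 h1 h2 hlo hhi
      have hle : hi ≤ lo := by omega
      have heq : lo = hi := le_antisymm h1 hle
      rw [lbAux, dif_neg (by omega)]
      have : xs.countP (fun v => decide (v < x)) = lo.toNat := by
        apply countP_of_split xs x lo.toNat (by omega)
        · intro i h hik; exact hlo i h (by omega)
        · intro i h hik; exact hhi i h (by omega)
      rw [this]; omega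
  | succ fuel ih =>
      intro lo hi hf h0 h1 h2 hlo hhi
      by_cases h : lo < hi
      · rw [lbAux, dif_pos h]
        have hb := PySem.Int.floordiv_two_mid_bounds (le_of_lt h)
        have hlt : PySem.Int.floordiv (lo + hi) 2 < hi := by
          rw [PySem.Int.floordiv_lt_iff_lt_mul (by omega)]
          omega
        set mid := PySem.Int.floordiv (lo + hi) 2 with hmid
        have hmr : mid.toNat < xs.length := by omega
        have hget : xs.getD mid.toNat 0 = xs[mid.toNat] := List.getD_eq_getElem xs 0 hmr
        by_cases hv : xs[mid.toNat] < x
        · rw [if_pos (by rw [hget]; exact hv)]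
          apply ih (mid + 1) hi (by omega) (by omega) (by omega) h2
          · intro i h' hi'
            have hile : i ≤ mid.toNat := by omega
            exact lt_of_le_of_lt (hmono i mid.toNat hmr hile) hv
          · exact hhi
        · rw [if_neg (by rw [hget]; exact hv)]
          apply ih lo mid (by omega) h0 (by omega) (by omega) hlo
          intro i h' hi'
          have : xs[mid.toNat] ≤ xs[i] := hmono mid.toNat i h' (by omega)
          omega
      · rw [lbAux, dif_neg h]
        have heq : lo = hi := le_antisymm h1 (by omega)
        have : xs.countP (fun v => decide (v < x)) = lo.toNat := by
          apply countP_of_split xs x lo.toNat (by omega)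
          · intro i h' hik; exact hlo i h' (by omega)
          · intro i h' hik; exact hhi i h' (by omega)
        rw [this]; omega

theorem lowerBound_eq (xs : List Int) (x : Int) (hs : xs.Pairwise (· ≤ ·)) :
    lowerBound xs x = (xs.countP (fun v => decide (v < x)) : Int) := by
  apply lbAux_spec xs x hs (xs.length : Int).toNat 0 xs.length (by omega) (by omega)
      (by omega) (by omega)
  · intro i h hi; omega
  · intro i h hi
    exfalso
    omega

-- ===== VERDICT (by name: the statement is the Claim_ definition above) =====
theorem solve_spec : Claim_equal_solve := by
  intro n s w _
  show solve n s w = solve_alt n s w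
  unfold solve solve_alt
  simp only [partition_fold, List.nil_append]
  set pairs := s.toList.zip w with hp
  set AL := pairs.filterMap (fun cw => if cw.1 ≠ '0' then some cw.2 else none) with hAL
  set CL := pairs.filterMap (fun cw => if cw.1 = '0' then some cw.2 else none) with hCL
  set SA := PySem.List.sorted AL (fun x => x) false with hSA
  set SC := PySem.List.sorted CL (fun x => x) false with hSC
  have hsaP : SA.Pairwise (· ≤ ·) := PySem.List.sorted_pairwise AL (fun x => x)
  have hscP : SC.Pairwise (· ≤ ·) := PySem.List.sorted_pairwise CL (fun x => x)
  -- B's binary-search counts equal countP counts on the sorted partitions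
  have hfn : (fun (st : Int × Int) x =>
        let m' := max st.1 x
        (m', max st.2 (((SA.length : Int) - lowerBound SA m') + lowerBound SC m')))
      = (fun (st : Int × Int) x =>
        let m' := max st.1 x
        (m', max st.2 ((SA.countP (fun a => decide (m' ≤ a)) : Int)
                        + (SC.countP (fun c => decide (c < m')) : Int)))) := by
    funext st x
    simp only [lowerBound_eq SA _ hsaP, lowerBound_eq SC _ hscP]
    have hsplit := countP_split SA (max st.1 x)
    have e3 : (SA.length : Int) - (SA.countP (fun v => decide (v < max st.1 x)) : Int)
          + (SC.countP (fun v => decide (v < max st.1 x)) : Int)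
        = (SA.countP (fun a => decide (max st.1 x ≤ a)) : Int)
          + (SC.countP (fun c => decide (c < max st.1 x)) : Int) := by
      omega
    simp only [e3]
  rw [hfn]
  -- peel the first threshold (the prepended 0) on both sides
  simp only [List.foldl_cons]
  have hA0 : ((SA.dropWhile (fun v => decide (v < (0:Int)))).length : Int)
      = (SA.countP (fun a => decide ((0:Int) ≤ a)) : Int) := by
    rw [dropWhile_lt_of_sorted SA hsaP, ← List.countP_eq_length_filter]
  have hC0 : (SC.length : Int) - ((SC.dropWhile (fun v => decide (v < (0:Int)))).length : Int)
      = (SC.countP (fun c => decide (c < (0:Int))) : Int) := by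
    rw [dropWhile_lt_of_sorted SC hscP, ← List.countP_eq_length_filter]
    exact countP_compl SC 0
  have hmax : max (0:Int) 0 = 0 := by omega
  have hpt : max (0:Int) (((SA.dropWhile (fun v => decide (v < (0:Int)))).length : Int)
        + (SC.length : Int) - ((SC.dropWhile (fun v => decide (v < (0:Int)))).length : Int))
      = max (0:Int) ((SA.countP (fun a => decide ((0:Int) ≤ a)) : Int)
        + (SC.countP (fun c => decide (c < (0:Int))) : Int)) := by
    omega
  simp only [hmax]
  rw [hpt]
  exact loop_inv (PySem.List.sorted w (fun x => x) false ++ [10 ^ 9 + 1]) SA SC hsaP hscP 0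
      (max (0:Int) ((SA.countP (fun a => decide ((0:Int) ≤ a)) : Int)
        + (SC.countP (fun c => decide (c < (0:Int))) : Int)))
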